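-- pv_equiv track=rewrite | github.com/Bountyex/6number5digit1and4digit4 | optimizer.py | calculate_payout
-- ===== SOURCE A (Python) =====
-- PAYOUTS = {
--     3: 15,
--     4: 450,
--     5: 1850,
--     6: 50000,
-- }
--
-- def match_count(combo, ticket):
--     return len(set(combo) & set(ticket))
--
-- def calculate_payout(combo, tickets):
--     stats = {"m3": 0, "m4": 0, "m5": 0, "m6": 0}
--     total = 0
--
--     for t in tickets:
--         m = match_count(combo, t)
--         if m >= 3:
--             total += PAYOUTS[m]
--             stats[f"m{m}"] += 1
--
--     return total, stats
-- ===== SOURCE B (Python) =====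
-- PAYOUTS = {
--     3: 15,
--     4: 450,
--     5: 1850,
--     6: 50000,
-- }
--
-- def _merge_count(xs, ys):
--     # number of common elements of two strictly increasing lists (two pointers)
--     i = j = n = 0
--     while i < len(xs) and j < len(ys):
--         if xs[i] < ys[j]:
--             i += 1
--         elif ys[j] < xs[i]:
--             j += 1
--         else:
--             n += 1
--             i += 1
--             j += 1
--     return n
--
-- def calculate_payout(combo, tickets):
--     # stage 1: sort the distinct combo numbers once, then compute each ticket's
--     # match count by a sorted two-pointer merge (no set intersection)
--     base = sorted(set(combo))
--     ms = [_merge_count(base, sorted(set(t))) for t in tickets]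
--     # stage 2: score each payout level by counting its occurrences in ms
--     stats = {f"m{m}": ms.count(m) for m in (3, 4, 5, 6)}
--     total = sum(PAYOUTS[m] * stats[f"m{m}"] for m in (3, 4, 5, 6))
--     return total, stats
-- ===== Notes on version B (the rewrite author's own statement) =====
-- stated objective: alternative
-- what changed: A makes one per-ticket pass accumulating total and stats together via set intersections; B computes each match count by a two-pointer merge over sorted deduplicated lists and then scores the four payout levels by counting occurrences in the list of match counts.
import Mathlib
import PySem

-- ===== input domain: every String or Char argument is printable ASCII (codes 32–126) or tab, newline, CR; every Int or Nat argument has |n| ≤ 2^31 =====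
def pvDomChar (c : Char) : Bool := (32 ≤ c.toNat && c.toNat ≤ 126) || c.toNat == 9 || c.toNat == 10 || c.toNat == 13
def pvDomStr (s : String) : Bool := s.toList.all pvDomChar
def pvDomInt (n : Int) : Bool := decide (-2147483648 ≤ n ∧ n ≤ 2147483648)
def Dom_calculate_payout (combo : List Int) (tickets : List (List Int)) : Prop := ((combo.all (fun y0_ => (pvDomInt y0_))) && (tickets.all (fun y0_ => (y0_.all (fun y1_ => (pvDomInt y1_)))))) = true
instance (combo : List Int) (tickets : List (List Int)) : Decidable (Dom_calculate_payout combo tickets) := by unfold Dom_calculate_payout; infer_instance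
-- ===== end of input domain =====

-- B replaces A's per-ticket set-intersection accumulation by a two-pointer merge of
-- sorted deduplicated lists plus a per-level count over the match-count list
-- (alternative decomposition; return values agree on Pre_).

-- ===== PORT A =====
def PAYOUTS : PySem.Dict Int Int :=
  ((((PySem.Dict.empty).insert 3 15).insert 4 450).insert 5 1850).insert 6 50000

def match_count (combo ticket : List Int) : Int :=
  ((PySem.Set.inter (PySem.Set.ofList combo) (PySem.Set.ofList ticket)).length : Int)

-- loop body of A: total += PAYOUTS[m]; stats[f"m{m}"] += 1 when m >= 3
-- (PAYOUTS[m] and stats[f"m{m}"] raise KeyError for m ≥ 7; those inputs are outside Pre_)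
def stepA (combo : List Int) (st : Int × PySem.Dict String Int) (t : List Int) :
    Int × PySem.Dict String Int :=
  let m := match_count combo t
  if 3 ≤ m then
    (st.1 + (PAYOUTS.get? m).getD 0, st.2.modify ("m" ++ PySem.Int.toStr m) 0 (· + 1))
  else st

def calculate_payout (combo : List Int) (tickets : List (List Int)) : Int × (List (String × Int)) :=
  let stats0 : PySem.Dict String Int :=
    ((((PySem.Dict.empty).insert "m3" 0).insert "m4" 0).insert "m5" 0).insert "m6" 0
  let r := tickets.foldl (stepA combo) (0, stats0)
  (r.1, r.2.items)

-- ===== PORT B =====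
-- two-pointer while loop of _merge_count, as recursion on the two list fronts
def mergeCount : List Int → List Int → Int
  | x :: xs, y :: ys =>
      if x < y then mergeCount xs (y :: ys)
      else if y < x then mergeCount (x :: xs) ys
      else mergeCount xs ys + 1
  | _, _ => 0
  termination_by xs ys => xs.length + ys.length

def calculate_payout_alt (combo : List Int) (tickets : List (List Int)) : Int × (List (String × Int)) :=
  let base := PySem.List.sorted (PySem.Set.ofList combo) (fun x => x) false
  let ms := tickets.map (fun t => mergeCount base (PySem.List.sorted (PySem.Set.ofList t) (fun x => x) false))
  let stats : PySem.Dict String Int :=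
    [(3 : Int), 4, 5, 6].foldl
      (fun d m => d.insert ("m" ++ PySem.Int.toStr m) ((PySem.List.count ms m : Int)))
      PySem.Dict.empty
  let total : Int :=
    ([(3 : Int), 4, 5, 6].map
      (fun m => (PAYOUTS.get? m).getD 0 * (stats.get? ("m" ++ PySem.Int.toStr m)).getD 0)).sum
  (total, stats.items)

-- ===== PRECONDITION & SPEC =====
-- Pre_ excludes exactly the inputs where some ticket shares more than 6 distinct values
-- with combo: there A raises KeyError (PAYOUTS has no key m ≥ 7).
def Pre_calculate_payout (combo : List Int) (tickets : List (List Int)) : Prop :=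
  ∀ t ∈ tickets,
    (PySem.Set.inter (PySem.Set.ofList combo) (PySem.Set.ofList t)).length ≤ 6
instance (combo : List Int) (tickets : List (List Int)) : Decidable (Pre_calculate_payout combo tickets) := by unfold Pre_calculate_payout; infer_instance

def pvWitness_calculate_payout : List Int × List (List Int) :=
  ([1, 2, 3, 4, 5, 6], [[1, 2, 3, 9, 10, 11], [1, 2, 3, 4, 5, 6], [7, 8, 9, 10, 11, 12]])

def Spec_calculate_payout (combo : List Int) (tickets : List (List Int)) (out : Int × (List (String × Int))) : Prop := out = calculate_payout_alt combo tickets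
instance (combo : List Int) (tickets : List (List Int)) (out : Int × (List (String × Int))) : Decidable (Spec_calculate_payout combo tickets out) := by unfold Spec_calculate_payout; infer_instance

-- ===== CLAIM (what is proved, stated in full; the proofs are below) =====
def Claim_equal_calculate_payout : Prop := ∀ (combo : List Int) (tickets : List (List Int)), Dom_calculate_payout combo tickets → Pre_calculate_payout combo tickets → Spec_calculate_payout combo tickets (calculate_payout combo tickets)

-- ===== LEMMAS AND PROOFS =====

-- the match count of a ticket, as a function (for counting)
def pvF (combo : List Int) (t : List Int) : Int :=
  ((PySem.Set.inter (PySem.Set.ofList combo) (PySem.Set.ofList t)).length : Int)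

lemma stepA_lt (combo t : List Int) (st : Int × PySem.Dict String Int)
    (h : match_count combo t < 3) : stepA combo st t = st := by
  simp [stepA, not_le.mpr h]

lemma stepA_3 (combo t : List Int) (total a b c e : Int) (h : match_count combo t = 3) :
    stepA combo (total, PySem.Dict.mk [("m3", a), ("m4", b), ("m5", c), ("m6", e)]) t =
      (total + 15, PySem.Dict.mk [("m3", a + 1), ("m4", b), ("m5", c), ("m6", e)]) := by
  have hs : ("m" ++ PySem.Int.toStr (3 : Int)) = "m3" := by decide
  simp [stepA, h, hs, PAYOUTS, PySem.Dict.modify, PySem.Dict.contains, PySem.Dict.getD,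
    PySem.Dict.get?, PySem.Dict.insert, PySem.Dict.empty]

lemma stepA_4 (combo t : List Int) (total a b c e : Int) (h : match_count combo t = 4) :
    stepA combo (total, PySem.Dict.mk [("m3", a), ("m4", b), ("m5", c), ("m6", e)]) t =
      (total + 450, PySem.Dict.mk [("m3", a), ("m4", b + 1), ("m5", c), ("m6", e)]) := by
  have hs : ("m" ++ PySem.Int.toStr (4 : Int)) = "m4" := by decide
  simp [stepA, h, hs, PAYOUTS, PySem.Dict.modify, PySem.Dict.contains, PySem.Dict.getD,
    PySem.Dict.get?, PySem.Dict.insert, PySem.Dict.empty]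

lemma stepA_5 (combo t : List Int) (total a b c e : Int) (h : match_count combo t = 5) :
    stepA combo (total, PySem.Dict.mk [("m3", a), ("m4", b), ("m5", c), ("m6", e)]) t =
      (total + 1850, PySem.Dict.mk [("m3", a), ("m4", b), ("m5", c + 1), ("m6", e)]) := by
  have hs : ("m" ++ PySem.Int.toStr (5 : Int)) = "m5" := by decide
  simp [stepA, h, hs, PAYOUTS, PySem.Dict.modify, PySem.Dict.contains, PySem.Dict.getD,
    PySem.Dict.get?, PySem.Dict.insert, PySem.Dict.empty]

lemma stepA_6 (combo t : List Int) (total a b c e : Int) (h : match_count combo t = 6) :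
    stepA combo (total, PySem.Dict.mk [("m3", a), ("m4", b), ("m5", c), ("m6", e)]) t =
      (total + 50000, PySem.Dict.mk [("m3", a), ("m4", b), ("m5", c), ("m6", e + 1)]) := by
  have hs : ("m" ++ PySem.Int.toStr (6 : Int)) = "m6" := by decide
  simp [stepA, h, hs, PAYOUTS, PySem.Dict.modify, PySem.Dict.contains, PySem.Dict.getD,
    PySem.Dict.get?, PySem.Dict.insert, PySem.Dict.empty]

lemma loopA_char (combo : List Int) (ts : List (List Int))
    (h : ∀ t ∈ ts, (PySem.Set.inter (PySem.Set.ofList combo) (PySem.Set.ofList t)).length ≤ 6)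
    (total a b c e : Int) :
    ts.foldl (stepA combo)
      (total, PySem.Dict.mk [("m3", a), ("m4", b), ("m5", c), ("m6", e)]) =
    (total + 15 * ((ts.map (pvF combo)).count 3 : Int)
           + 450 * ((ts.map (pvF combo)).count 4 : Int)
           + 1850 * ((ts.map (pvF combo)).count 5 : Int)
           + 50000 * ((ts.map (pvF combo)).count 6 : Int),
     PySem.Dict.mk
     [("m3", a + ((ts.map (pvF combo)).count 3 : Int)),
      ("m4", b + ((ts.map (pvF combo)).count 4 : Int)),
      ("m5", c + ((ts.map (pvF combo)).count 5 : Int)),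
      ("m6", e + ((ts.map (pvF combo)).count 6 : Int))]) := by
  induction ts generalizing total a b c e with
  | nil => simp
  | cons t ts ih =>
    have ht : (PySem.Set.inter (PySem.Set.ofList combo) (PySem.Set.ofList t)).length ≤ 6 :=
      h t (List.mem_cons_self ..)
    have hts : ∀ u ∈ ts, (PySem.Set.inter (PySem.Set.ofList combo) (PySem.Set.ofList u)).length ≤ 6 :=
      fun u hu => h u (List.mem_cons_of_mem _ hu)
    set n := (PySem.Set.inter (PySem.Set.ofList combo) (PySem.Set.ofList t)).length with hn
    have hm : match_count combo t = (n : Int) := rfl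
    have hf : pvF combo t = (n : Int) := rfl
    simp only [List.foldl_cons, List.map_cons, List.count_cons, hf]
    interval_cases n
    · rw [stepA_lt combo t _ (by rw [hm]; norm_num), ih hts]; norm_num
    · rw [stepA_lt combo t _ (by rw [hm]; norm_num), ih hts]; norm_num
    · rw [stepA_lt combo t _ (by rw [hm]; norm_num), ih hts]; norm_num
    · rw [stepA_3 combo t _ _ _ _ _ (by rw [hm]; norm_num), ih hts]; norm_num
      ring_nf
      simp
    · rw [stepA_4 combo t _ _ _ _ _ (by rw [hm]; norm_num), ih hts]; norm_num
      ring_nf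
      simp
    · rw [stepA_5 combo t _ _ _ _ _ (by rw [hm]; norm_num), ih hts]; norm_num
      ring_nf
      simp
    · rw [stepA_6 combo t _ _ _ _ _ (by rw [hm]; norm_num), ih hts]; norm_num
      ring_nf
      simp

-- the two-pointer merge of strictly increasing lists counts the common elements
lemma mergeCount_filter : ∀ (xs ys : List Int), xs.Pairwise (· < ·) → ys.Pairwise (· < ·) →
    mergeCount xs ys = ((xs.filter (fun x => ys.contains x)).length : Int) := by
  intro xs ys hx hy
  fun_induction mergeCount xs ys with
  | case1 x xs y ys hlt ih =>
    have hx' := (List.pairwise_cons.mp hx).2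
    have hmem : x ∉ y :: ys := by
      intro hz
      rcases List.mem_cons.mp hz with h | h
      · omega
      · exact absurd ((List.pairwise_cons.mp hy).1 x h) (by omega)
    rw [List.filter_cons_of_neg (by simpa using hmem), ih hx' hy]
  | case2 x xs y ys hnlt hlt ih =>
    have hy' := (List.pairwise_cons.mp hy).2
    have hcong : ∀ z ∈ x :: xs, ((y :: ys).contains z) = (ys.contains z) := by
      intro z hz
      have hzx : x ≤ z := by
        rcases List.mem_cons.mp hz with h | h
        · omega
        · exact le_of_lt ((List.pairwise_cons.mp hx).1 z h)
      simp [show z ≠ y by omega]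
    rw [List.filter_congr hcong, ih hx hy']
  | case3 x xs y ys hnlt hnlt2 ih =>
    have heq : x = y := by omega
    have hx' := (List.pairwise_cons.mp hx).2
    have hy' := (List.pairwise_cons.mp hy).2
    have hcong : ∀ z ∈ xs, ((y :: ys).contains z) = (ys.contains z) := by
      intro z hz
      have := (List.pairwise_cons.mp hx).1 z hz
      simp [show z ≠ y by omega]
    rw [List.filter_cons_of_pos (by simp [heq]),
      List.filter_congr hcong, ih hx' hy']
    simp only [List.length_cons]
    push_cast
    ring
  | case4 xs ys h =>
    rcases xs with _ | ⟨x, xs⟩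
    · simp
    · rcases ys with _ | ⟨y, ys⟩
      · simp
      · exact (h x xs y ys rfl rfl).elim

-- B's per-ticket merge count equals A's set-intersection match count
lemma mergeCount_eq_pvF (combo t : List Int) :
    mergeCount (PySem.List.sorted (PySem.Set.ofList combo) (fun x => x) false)
      (PySem.List.sorted (PySem.Set.ofList t) (fun x => x) false) = pvF combo t := by
  rw [mergeCount_filter _ _ (PySem.List.sorted_ofList_pairwise_lt ..)
      (PySem.List.sorted_ofList_pairwise_lt ..)]
  have hcong : ∀ z ∈ PySem.List.sorted (PySem.Set.ofList combo) (fun x => x) false,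
      ((PySem.List.sorted (PySem.Set.ofList t) (fun x => x) false).contains z)
        = ((PySem.Set.ofList t).contains z) := by
    intro z _
    simp [List.contains_eq_mem, PySem.Set.contains, PySem.List.mem_sorted]
  rw [List.filter_congr hcong]
  have hperm : (PySem.List.sorted (PySem.Set.ofList combo) (fun x => x) false).Perm
      (PySem.Set.ofList combo) := PySem.List.sorted_perm ..
  have := (hperm.filter (fun z => (PySem.Set.ofList t).contains z)).length_eq
  rw [this]
  rfl

-- ===== VERDICT (by name: the statement is the Claim_ definition above) =====
theorem calculate_payout_spec : Claim_equal_calculate_payout := by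
  intro combo tickets _ hpre
  unfold Spec_calculate_payout calculate_payout calculate_payout_alt
  have h0 : ((((PySem.Dict.empty).insert "m3" (0 : Int)).insert "m4" 0).insert "m5" 0).insert "m6" 0
      = PySem.Dict.mk [("m3", 0), ("m4", 0), ("m5", 0), ("m6", 0)] := by decide
  simp only [h0, loopA_char combo tickets hpre 0 0 0 0 0]
  have hms : tickets.map (fun t => mergeCount
        (PySem.List.sorted (PySem.Set.ofList combo) (fun x => x) false)
        (PySem.List.sorted (PySem.Set.ofList t) (fun x => x) false))
      = tickets.map (pvF combo) := by
    exact List.map_congr_left (fun t _ => mergeCount_eq_pvF combo t)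
  simp only [hms]
  have p3 : (PAYOUTS.get? (3 : Int)).getD 0 = 15 := by decide
  have p4 : (PAYOUTS.get? (4 : Int)).getD 0 = 450 := by decide
  have p5 : (PAYOUTS.get? (5 : Int)).getD 0 = 1850 := by decide
  have p6 : (PAYOUTS.get? (6 : Int)).getD 0 = 50000 := by decide
  have h3 : ("m" ++ PySem.Int.toStr (3 : Int)) = "m3" := by decide
  have h4 : ("m" ++ PySem.Int.toStr (4 : Int)) = "m4" := by decide
  have h5 : ("m" ++ PySem.Int.toStr (5 : Int)) = "m5" := by decide
  have h6 : ("m" ++ PySem.Int.toStr (6 : Int)) = "m6" := by decide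
  simp only [List.foldl, List.map, h3, h4, h5, h6, p3, p4, p5, p6]
  rw [PySem.List.count_eq, PySem.List.count_eq, PySem.List.count_eq, PySem.List.count_eq]
  simp [PySem.Dict.insert, PySem.Dict.contains, PySem.Dict.empty, PySem.Dict.get?]
  ring
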